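-- pv_equiv track=rewrite | github.com/Prowderypulp/DIRA | features.py | _homopolymer_length
-- ===== SOURCE A (Python) =====
-- def _homopolymer_length(ref_seq: str, pos: int) -> int:
--     """Length of homopolymer run overlapping or adjacent to pos in ref_seq."""
--     if not ref_seq or pos >= len(ref_seq):
--         return 1
--     base = ref_seq[pos].upper()
--     if base not in "ACGT":
--         return 1
--     # expand left
--     left = pos
--     while left > 0 and ref_seq[left - 1].upper() == base:
--         left -= 1
--     # expand right
--     right = pos
--     while right < len(ref_seq) - 1 and ref_seq[right + 1].upper() == base:
--         right += 1
--     return right - left + 1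
-- ===== SOURCE B (Python) =====
-- def _homopolymer_length(ref_seq: str, pos: int) -> int:
--     """Length of homopolymer run overlapping pos: single left-to-right run scan."""
--     if not ref_seq or pos >= len(ref_seq):
--         return 1
--     up = ref_seq.upper()
--     if up[pos] not in "ACGT":
--         return 1
--     # walk maximal runs once, left to right; return the run containing pos
--     n = len(up)
--     i = 0
--     while i < n:
--         j = i
--         while j < n and up[j] == up[i]:
--             j += 1
--         if i <= pos < j:
--             return j - i
--         i = j
-- ===== Notes on version B (the rewrite author's own statement) =====
-- stated objective: alternative
-- what changed: Replaced A's two center-out while-loops (expand left, expand right from pos) with a single left-to-right scan over maximal runs of the uppercased sequence that returns the length of the run containing pos.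
-- outside the precondition, e.g. on _homopolymer_length('AAAA', -2): A returns 6, B returns None; on _homopolymer_length('GG', -1): A returns 3, B returns None
import Mathlib
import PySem

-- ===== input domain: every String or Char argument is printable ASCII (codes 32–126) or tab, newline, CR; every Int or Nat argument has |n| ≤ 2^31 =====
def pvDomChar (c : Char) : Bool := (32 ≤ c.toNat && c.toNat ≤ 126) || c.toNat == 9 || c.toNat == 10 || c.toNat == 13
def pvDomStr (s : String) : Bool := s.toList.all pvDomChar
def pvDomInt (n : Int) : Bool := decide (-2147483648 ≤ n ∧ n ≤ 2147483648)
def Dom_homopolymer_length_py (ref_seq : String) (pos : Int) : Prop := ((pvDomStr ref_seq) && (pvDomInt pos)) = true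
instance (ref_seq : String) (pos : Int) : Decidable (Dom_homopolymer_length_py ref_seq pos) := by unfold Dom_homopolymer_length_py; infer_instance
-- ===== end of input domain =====

-- B replaces A's two center-out expansion loops with one left-to-right scan over maximal runs
-- of the uppercased sequence (objective: alternative decomposition, same exact result on Pre_).

-- ===== PORT A =====
-- 'while left > 0 and ref_seq[left-1].upper() == base: left -= 1'.
-- Fuel pos.toNat bounds the number of decrements (the loop stops at 0); when the condition is
-- taken the index left-1 is in [0, len), so the in-range '(pyGet? …).getD' is exact Python indexing.
def pvExpandLeft (s : List Char) (base : Char) : Int → Nat → Int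
  | l, 0 => l
  | l, fuel+1 =>
    if 0 < l ∧ PySem.Chars.upperChar ((PySem.List.pyGet? s (l - 1)).getD ' ') = base
    then pvExpandLeft s base (l - 1) fuel else l

-- 'while right < len(ref_seq)-1 and ref_seq[right+1].upper() == base: right += 1'.
-- Fuel (len-1-pos).toNat bounds the number of increments for 0 ≤ pos (the inputs Pre_ admits).
def pvExpandRight (s : List Char) (base : Char) : Int → Nat → Int
  | r, 0 => r
  | r, fuel+1 =>
    if r < (s.length : Int) - 1 ∧ PySem.Chars.upperChar ((PySem.List.pyGet? s (r + 1)).getD ' ') = base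
    then pvExpandRight s base (r + 1) fuel else r

def homopolymer_length_py (ref_seq : String) (pos : Int) : Int :=
  let s := ref_seq.toList
  if s = [] ∨ (s.length : Int) ≤ pos then 1
  else
    match PySem.Str.pyGet? ref_seq pos with
    | none => 1   -- IndexError in Python (pos < -len); excluded by Pre_
    | some c =>
      let base := PySem.Chars.upperChar c
      if ¬ (base ∈ "ACGT".toList) then 1
      else
        pvExpandRight s base pos ((s.length : Int) - 1 - pos).toNat
          - pvExpandLeft s base pos pos.toNat + 1

-- ===== PORT B =====
-- the run-scan loop of Source B; pos is kept relative to the current suffix (pos - i),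
-- so 'i <= pos < j' becomes '0 ≤ pos < run.length+1', and the inner
-- 'while j < n and up[j] == up[i]' is the takeWhile computing the current maximal run
def pvRunScan (up : List Char) (pos : Int) : Int :=
  match up with
  | [] => 1   -- Python B's loop can only fall off (returning None) for pos < 0, outside Pre_
  | c :: rest =>
    let run := rest.takeWhile (fun d => d == c)
    if 0 ≤ pos ∧ pos < (run.length : Int) + 1 then (run.length : Int) + 1
    else pvRunScan (rest.drop run.length) (pos - ((run.length : Int) + 1))
termination_by up.length
decreasing_by simp

def homopolymer_length_py_alt (ref_seq : String) (pos : Int) : Int :=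
  let s := ref_seq.toList
  if s = [] ∨ (s.length : Int) ≤ pos then 1
  else
    let up := PySem.Chars.upper s   -- ref_seq.upper()
    match PySem.List.pyGet? up pos with
    | none => 1   -- IndexError in Python B (pos < -len); excluded by Pre_
    | some b =>
      if ¬ (b ∈ "ACGT".toList) then 1
      else pvRunScan up pos

-- ===== PRECONDITION & SPEC =====
-- Pre_ excludes negative pos on a nonempty sequence: there A raises IndexError (pos < -len) or mixes
-- Python's negative indexing for the base with literal bound arithmetic for the run, yielding
-- accidental values (e.g. 6 on 'AAAA' at -2) no caller would specify, while B falls off its scan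
-- and returns None (not an int).
def Pre_homopolymer_length_py (ref_seq : String) (pos : Int) : Prop := ref_seq = "" ∨ 0 ≤ pos
instance (ref_seq : String) (pos : Int) : Decidable (Pre_homopolymer_length_py ref_seq pos) := by
  unfold Pre_homopolymer_length_py; infer_instance

def pvWitness_homopolymer_length_py : String × Int := ("AACG", 1)

def Spec_homopolymer_length_py (ref_seq : String) (pos : Int) (out : Int) : Prop := out = homopolymer_length_py_alt ref_seq pos
instance (ref_seq : String) (pos : Int) (out : Int) : Decidable (Spec_homopolymer_length_py ref_seq pos out) := by unfold Spec_homopolymer_length_py; infer_instance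

-- ===== CLAIM (what is proved, stated in full; the proofs are below) =====
def Claim_equal_homopolymer_length_py : Prop := ∀ (ref_seq : String) (pos : Int), Dom_homopolymer_length_py ref_seq pos → Pre_homopolymer_length_py ref_seq pos → Spec_homopolymer_length_py ref_seq pos (homopolymer_length_py ref_seq pos)

-- ===== LEMMAS AND PROOFS =====

lemma pv_takeWhile_nil_of_all_false {α : Type} (q : α → Bool) :
    ∀ l : List α, (∀ x ∈ l, q x = false) → l.takeWhile q = [] := by
  intro l h
  cases l with
  | nil => rfl
  | cons a t => simp [List.takeWhile_cons, h a (by simp)]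

lemma pv_takeWhile_dropWhile_nil {α : Type} (q : α → Bool) (l : List α) :
    (l.dropWhile q).takeWhile q = [] := by
  induction l with
  | nil => rfl
  | cons a t ih =>
    by_cases h : q a
    · simpa [List.dropWhile_cons, h] using ih
    · simp [List.dropWhile_cons, h, List.takeWhile_cons, h]

-- every index inside the leading run (head plus its takeWhile) holds the head character
lemma pv_get_run (c : Char) (rest : List Char) :
    ∀ i : Nat, i ≤ (rest.takeWhile (fun d => d == c)).length →
      ∀ (hi : i < (c :: rest).length), (c :: rest)[i] = c := by
  intro i hle hi
  cases i with
  | zero => rfl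
  | succ j =>
    have hjr : j < (rest.takeWhile (fun d => d == c)).length := by omega
    have hpre : rest.takeWhile (fun d => d == c) <+: rest := List.takeWhile_prefix _
    have hgetp : (rest.takeWhile (fun d => d == c))[j] = rest[j]'(lt_of_lt_of_le hjr hpre.length_le) :=
      hpre.getElem hjr
    have hmem : (rest.takeWhile (fun d => d == c))[j] ∈ rest.takeWhile (fun d => d == c) :=
      List.getElem_mem _
    have hq := List.mem_takeWhile_imp hmem
    have hc : rest[j]'(lt_of_lt_of_le hjr hpre.length_le) = c := by
      rw [← hgetp]; exact beq_iff_eq.1 hq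
    simpa using hc

lemma pv_left_spec (s : List Char) (base : Char) :
    ∀ p : Nat, p ≤ s.length →
      pvExpandLeft s base (p : Int) p =
        (p : Int) - (((s.map PySem.Chars.upperChar).take p).reverse.takeWhile
            (fun d => d == base)).length := by
  intro p
  induction p with
  | zero => intro _; simp [pvExpandLeft]
  | succ n ih =>
    intro hlen
    have hn : n < s.length := by omega
    have hget : PySem.List.pyGet? s (((n : Nat) + 1 : Int) - 1) = some (s[n]'hn) := by
      have h1 : ((n : Nat) + 1 : Int) - 1 = ((n : Nat) : Int) := by ring
      rw [h1, PySem.List.pyGet?_natCast]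
      simp [List.getElem?_eq_getElem hn]
    have htake : ((s.map PySem.Chars.upperChar).take (n + 1)).reverse =
        PySem.Chars.upperChar (s[n]'hn) :: ((s.map PySem.Chars.upperChar).take n).reverse := by
      rw [List.take_succ]
      simp [List.getElem?_eq_getElem, hn]
    rw [show (((n + 1 : Nat)) : Int) = ((n : Nat) : Int) + 1 by push_cast; ring]
    rw [pvExpandLeft, hget]
    by_cases hb : PySem.Chars.upperChar (s[n]'hn) = base
    · rw [if_pos ⟨by positivity, by simpa using hb⟩]
      rw [show ((n : Nat) : Int) + 1 - 1 = ((n : Nat) : Int) by ring, ih (by omega), htake]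
      simp [List.takeWhile_cons, hb]
    · rw [if_neg (by simp [hb])]
      rw [htake]
      simp [List.takeWhile_cons, hb]

lemma pv_right_spec (s : List Char) (base : Char) :
    ∀ (f p : Nat), p < s.length → s.length - 1 - p = f →
      pvExpandRight s base (p : Int) f =
        (p : Int) + (((s.map PySem.Chars.upperChar).drop (p + 1)).takeWhile
            (fun d => d == base)).length := by
  intro f
  induction f with
  | zero =>
    intro p hp hf
    have hpe : p + 1 = s.length := by omega
    rw [pvExpandRight]
    rw [List.drop_eq_nil_of_le (by simpa using le_of_eq hpe.symm)]
    simp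
  | succ n ih =>
    intro p hp hf
    have hp1 : p + 1 < s.length := by omega
    have hget : PySem.List.pyGet? s (((p : Nat) : Int) + 1) = some (s[p+1]'hp1) := by
      rw [show ((p : Nat) : Int) + 1 = (((p + 1 : Nat)) : Int) by push_cast; ring,
        PySem.List.pyGet?_natCast]
      simp [List.getElem?_eq_getElem hp1]
    have hdrop : (s.map PySem.Chars.upperChar).drop (p + 1) =
        PySem.Chars.upperChar (s[p+1]'hp1) :: (s.map PySem.Chars.upperChar).drop (p + 2) := by
      rw [List.drop_eq_getElem_cons (by simpa using hp1)]
      simp [hp1]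
    rw [pvExpandRight, hget]
    by_cases hb : PySem.Chars.upperChar (s[p+1]'hp1) = base
    · rw [if_pos ⟨by push_cast; omega, by simpa using hb⟩]
      rw [show ((p : Nat) : Int) + 1 = (((p + 1 : Nat)) : Int) by push_cast; ring]
      rw [ih (p + 1) hp1 (by omega), hdrop]
      simp [List.takeWhile_cons, hb]
      push_cast
      ring
    · rw [if_neg (by simp [hb])]
      rw [hdrop]
      simp [List.takeWhile_cons, hb]

lemma pv_runScan_spec :
    ∀ (n : Nat) (u : List Char), u.length ≤ n → ∀ (p : Nat) (hp : p < u.length),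
      pvRunScan u ((p : Nat) : Int) =
        ((((u.take p).reverse.takeWhile (fun d => d == u[p])).length : Nat) : Int)
        + ((((u.drop (p + 1)).takeWhile (fun d => d == u[p])).length : Nat) : Int) + 1 := by
  intro n
  induction n with
  | zero => intro u hu p hp; omega
  | succ n ih =>
    intro u hu p hp
    match u with
    | [] => simp at hp
    | c :: rest =>
      rw [pvRunScan.eq_def]
      simp only []
      set run := rest.takeWhile (fun d => d == c) with hrun
      have hrl : run.length ≤ rest.length := (List.takeWhile_prefix _).length_le
      by_cases hin : ((p : Nat) : Int) < ((run.length : Nat) : Int) + 1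
      · -- pos inside the leading run
        rw [if_pos ⟨by positivity, hin⟩]
        have hple : p ≤ run.length := by exact_mod_cast (by omega : (p : Int) ≤ (run.length : Int))
        have hbase : (c :: rest)[p] = c := pv_get_run c rest p hple hp
        rw [hbase]
        -- left part: every element of take p equals c
        have hmrev : ((c :: rest).take p).reverse.takeWhile (fun d => d == c) =
            ((c :: rest).take p).reverse := by
          rw [List.takeWhile_eq_self_iff]
          intro x hx
          have hx' : x ∈ (c :: rest).take p := by simpa using hx
          obtain ⟨i, hi, hix⟩ := List.mem_take_iff_getElem.1 hx'
          have hi2 : i < p := by simp [List.length_take] at hi; omega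
          have hic : (c :: rest)[i]'(by omega) = c :=
            pv_get_run c rest i (by rw [← hrun]; omega) (by omega)
          simp [← hix, hic]
        -- right part
        have hsplit : rest = run ++ rest.dropWhile (fun d => d == c) := by
          rw [hrun]; exact (List.takeWhile_append_dropWhile).symm
        have hdropP : (c :: rest).drop (p + 1) = rest.drop p := by simp
        have hk : (rest.drop p).takeWhile (fun d => d == c) = run.drop p := by
          conv_lhs => rw [hsplit, List.drop_append_of_le_length hple]
          rw [List.takeWhile_append]
          have hall : (run.drop p).takeWhile (fun d => d == c) = run.drop p := by
            rw [List.takeWhile_eq_self_iff]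
            intro x hx
            have hx2 : x ∈ run := List.mem_of_mem_drop hx
            rw [hrun] at hx2
            simpa using List.mem_takeWhile_imp hx2
          rw [if_pos (by rw [hall]), pv_takeWhile_dropWhile_nil]
          simp
        rw [hdropP, hk, hmrev]
        have h1 : ((c :: rest).take p).reverse.length = p := by
          simp [List.length_take]
          omega
        have h2 : (run.drop p).length = run.length - p := by simp
        rw [h1, h2]
        push_cast [Nat.cast_sub hple]
        ring
      · -- pos beyond the leading run: recurse into the rest
        rw [if_neg (fun hcon => hin hcon.2)]
        have hLp : run.length + 1 ≤ p := by
          exact_mod_cast (by omega : ((run.length : Nat) : Int) + 1 ≤ (p : Int))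
        set u' := rest.dropWhile (fun d => d == c) with hu'
        have hsplit' : rest = run ++ u' := (List.takeWhile_append_dropWhile).symm
        have hdropRun : rest.drop run.length = u' := by
          conv_lhs => rw [hsplit']
          exact List.drop_left (l₁ := run) (l₂ := u')
        have hsplitU : c :: rest = (c :: run) ++ u' := by
          rw [hsplit']; rfl
        have hlenU : run.length + u'.length = rest.length := by
          have := congrArg List.length hsplit'
          simpa using this.symm
        set p' := p - (run.length + 1) with hp'
        have hplen : p < rest.length + 1 := by simpa using hp
        have hp'lt : p' < u'.length := by omega
        have hcastp : ((p : Nat) : Int) - (((run.length : Nat) : Int) + 1) = ((p' : Nat) : Int) := by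
          push_cast [hp', Nat.cast_sub hLp]; ring
        have hu2 : rest.length + 1 ≤ n + 1 := by simpa using hu
        have hu'len : u'.length ≤ n := by omega
        rw [hdropRun, hcastp, ih u' hu'len p' hp'lt]
        -- now rewrite base, take, drop through the append decomposition
        have hLcr : (c :: run).length = run.length + 1 := by simp
        have hidx : p - (c :: run).length = p' := by simp only [List.length_cons]; omega
        have hbase : (c :: rest)[p] = u'[p']'hp'lt := by
          have h1 : (c :: rest)[p] = ((c :: run) ++ u')[p]'(hsplitU ▸ hp) :=
            List.getElem_of_eq hsplitU hp
          rw [h1, List.getElem_append_right (by simp; omega)]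
          simp only [hidx]
        have hdropEq : (c :: rest).drop (p + 1) = u'.drop (p' + 1) := by
          rw [hsplitU, List.drop_append]
          have h3 : (c :: run).drop (p + 1) = [] := List.drop_eq_nil_of_le (by simp; omega)
          have h4 : p + 1 - (c :: run).length = p' + 1 := by simp only [List.length_cons]; omega
          rw [h3, h4, List.nil_append]
        have htakeEq : (c :: rest).take p = (c :: run) ++ u'.take p' := by
          rw [hsplitU, List.take_append]
          have h3 : (c :: run).take p = c :: run := List.take_of_length_le (by simp; omega)
          rw [h3, hidx]
        -- the head of u' is not c
        have hu'ne : u' ≠ [] := by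
          intro h; rw [h] at hp'lt; simp at hp'lt
        have hheadnotc : ((u'.head hu'ne) == c) = false := List.head_dropWhile_not _ hu'ne
        have hu0ne : u'[0]'(by omega) ≠ c := by
          intro h
          have h2 : (u'.head hu'ne == c) = true := by
            rw [List.head_eq_getElem hu'ne, h]
            simp
          rw [h2] at hheadnotc
          simp at hheadnotc
        -- m = m'
        have hm : ((c :: rest).take p).reverse.takeWhile (fun d => d == u'[p']'hp'lt) =
            (u'.take p').reverse.takeWhile (fun d => d == u'[p']'hp'lt) := by
          rw [htakeEq, List.reverse_append, List.takeWhile_append]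
          by_cases hfull : ((u'.take p').reverse.takeWhile (fun d => d == u'[p']'hp'lt)).length =
              (u'.take p').reverse.length
          · rw [if_pos hfull]
            have hfull' : (u'.take p').reverse.takeWhile (fun d => d == u'[p']'hp'lt) =
                (u'.take p').reverse := by
              exact (List.takeWhile_sublist _).eq_of_length (by omega)
            -- u'[p'] ≠ c
            have hcne : ∀ x, x = c → (x == u'[p']'hp'lt) = false := by
              intro x hx
              cases hx
              by_cases hp0 : p' = 0
              · have he : u'[p']'hp'lt = u'[0]'(by omega) := by simp only [hp0]
                rw [he]
                simp only [beq_eq_false_iff_ne, ne_eq]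
                intro h
                exact hu0ne h.symm
              · have h0mem : u'[0]'(by omega) ∈ (u'.take p').reverse := by
                  simp only [List.mem_reverse]
                  exact List.mem_take_iff_getElem.2 ⟨0, by omega, rfl⟩
                have h0b := List.takeWhile_eq_self_iff.1 hfull' _ h0mem
                have h0eq : u'[0]'(by omega) = u'[p']'hp'lt := beq_iff_eq.1 h0b
                simp only [beq_eq_false_iff_ne, ne_eq]
                intro h
                exact hu0ne (h0eq.trans h.symm)
            have htail : (c :: run).reverse.takeWhile (fun d => d == u'[p']'hp'lt) = [] := by
              apply pv_takeWhile_nil_of_all_false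
              intro x hx
              apply hcne
              rcases (by simpa using hx : x ∈ run ∨ x = c) with h | h
              · have h2 : x ∈ rest.takeWhile (fun d => d == c) := by rw [← hrun]; exact h
                have := List.mem_takeWhile_imp h2
                exact beq_iff_eq.1 (by simpa using this)
              · exact h
            rw [htail, hfull']
            simp
          · rw [if_neg hfull]
        rw [hdropEq]
        generalize hb : (c :: rest)[p]'hp = b at *
        rw [← hbase] at hm ⊢
        rw [hm]

-- ===== VERDICT (by name: the statement is the Claim_ definition above) =====
theorem homopolymer_length_py_spec : Claim_equal_homopolymer_length_py := by
  intro ref_seq pos _ hpre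
  unfold Spec_homopolymer_length_py homopolymer_length_py homopolymer_length_py_alt
  set s := ref_seq.toList with hs
  by_cases hnil : s = [] ∨ (s.length : Int) ≤ pos
  · simp only [hnil, if_true]
  · obtain ⟨hne, hlt⟩ : ¬ s = [] ∧ pos < (s.length : Int) := by
      constructor
      · exact fun h => hnil (Or.inl h)
      · exact lt_of_not_ge (fun h => hnil (Or.inr h))
    have hpos : 0 ≤ pos := by
      rcases hpre with h | h
      · exact absurd (by rw [hs, h]; rfl) hne
      · exact h
    simp only [if_neg (not_or.mpr ⟨hne, not_le.mpr hlt⟩)]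
    set p := pos.toNat with hpdef
    have hposp : pos = ((p : Nat) : Int) := by omega
    have hplen : p < s.length := by omega
    have hup : PySem.Chars.upper s = s.map PySem.Chars.upperChar := rfl
    have hgetA : PySem.Str.pyGet? ref_seq pos = some (s[p]'hplen) := by
      rw [hposp, PySem.Str.pyGet?_natCast, ← hs]
      exact List.getElem?_eq_getElem hplen
    have hmaplen : p < (s.map PySem.Chars.upperChar).length := by simpa using hplen
    have hgetB : PySem.List.pyGet? (PySem.Chars.upper s) pos =
        some ((s.map PySem.Chars.upperChar)[p]'hmaplen) := by
      rw [hup, hposp, PySem.List.pyGet?_natCast]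
      exact List.getElem?_eq_getElem hmaplen
    rw [hgetA, hgetB]
    have hbase : (s.map PySem.Chars.upperChar)[p]'hmaplen = PySem.Chars.upperChar (s[p]'hplen) := by
      simp
    rw [hbase]
    dsimp only
    by_cases hacgt : PySem.Chars.upperChar (s[p]'hplen) ∈ "ACGT".toList
    · rw [if_neg (not_not_intro hacgt), if_neg (not_not_intro hacgt)]
      set base := PySem.Chars.upperChar (s[p]'hplen) with hbdef
      have hleft := pv_left_spec s base p (le_of_lt hplen)
      have hright := pv_right_spec s base (s.length - 1 - p) p hplen rfl
      have hscan := pv_runScan_spec (s.map PySem.Chars.upperChar).length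
        (s.map PySem.Chars.upperChar) le_rfl p hmaplen
      have hfuel : ((s.length : Int) - 1 - ((p : Nat) : Int)).toNat = s.length - 1 - p := by
        omega
      rw [hup, hposp, hfuel, hleft, hright, hscan, hbase]
      push_cast
      ring
    · rw [if_pos hacgt, if_pos hacgt]
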